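-- pv_equiv track=rewrite | github.com/hdmquan/taxon_subsequence_matcher | find.py | _check
-- ===== SOURCE A (Python) =====
-- def match_positions(name: str, seq: str) -> list[int] | None:
--
--     nl = name.lower()
--     positions = []
--     si = 0
--
--     for i, c in enumerate(nl):
--
--         if si < len(seq) and c == seq[si]:
--
--             positions.append(i)
--             si += 1
--
--     return positions if si == len(seq) else None
--
-- def has_long_run(positions: list[int], limit: int = 2) -> bool:
--
--     run = 1
--
--     for i in range(1, len(positions)):
--
--         if positions[i] == positions[i - 1] + 1:
--             run += 1
--
--             if run > limit:
--                 return True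
--
--         else:
--             run = 1
--
--     return False
--
-- def fmt(name: str, positions: list[int]) -> str:
--     matched = set(positions)
--     out = []
--     i = 0
--     while i < len(name):
--         if i in matched:
--             run = []
--             while i < len(name) and i in matched:
--                 run.append(name[i].upper())
--                 i += 1
--             out.append(f"**{''.join(run)}**")
--         else:
--             out.append(name[i].lower())
--             i += 1
--     return "".join(out)
--
-- def _check(args: tuple) -> list:
--
--     names, seq, words, no_direct, do_fmt = args
--     out = []
--
--     for n in names:
--
--         if words is not None and len(n.split()) != words:
--             continue
--
--         positions = match_positions(n, seq)
--
--         if positions is None: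
--             continue
--
--         if no_direct and has_long_run(positions):
--             continue
--
--         out.append(fmt(n, positions) if do_fmt else n)
--
--     return out
-- ===== SOURCE B (Python) =====
-- def _check(args: tuple) -> list:
--     # Single pass per name: matching, long-run detection and formatting fused into one scan.
--     names, seq, words, no_direct, do_fmt = args
--     k = len(seq)
--     result = []
--     for n in names:
--         if words is not None and len(n.split()) != words:
--             continue
--         si = 0
--         run = 0
--         long_run = False
--         prev_matched = False
--         pieces = []
--         for c in n:
--             cl = c.lower()
--             if si < k and cl == seq[si]:
--                 si += 1
--                 run += 1
--                 if run > 2: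
--                     long_run = True
--                 if do_fmt:
--                     if not prev_matched:
--                         pieces.append("**")
--                     pieces.append(c.upper())
--                 prev_matched = True
--             else:
--                 run = 0
--                 if do_fmt:
--                     if prev_matched:
--                         pieces.append("**")
--                     pieces.append(cl)
--                 prev_matched = False
--         if si != k:
--             continue
--         if no_direct and long_run:
--             continue
--         if do_fmt:
--             if prev_matched:
--                 pieces.append("**")
--             result.append("".join(pieces))
--         else:
--             result.append(n)
--     return result
-- ===== Notes on version B (the rewrite author's own statement) =====
-- stated objective: alternative
-- what changed: Replaces A's three separate passes per name (greedy position-collecting scan, long-run detection over the positions list, and a set-membership index walk for formatting) with one fused scan over the name's characters that simultaneously matches the subsequence, tracks the current consecutive-match run length, and emits the formatted output with ** delimiters at run boundaries; no positions list or set is built.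
import Mathlib
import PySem

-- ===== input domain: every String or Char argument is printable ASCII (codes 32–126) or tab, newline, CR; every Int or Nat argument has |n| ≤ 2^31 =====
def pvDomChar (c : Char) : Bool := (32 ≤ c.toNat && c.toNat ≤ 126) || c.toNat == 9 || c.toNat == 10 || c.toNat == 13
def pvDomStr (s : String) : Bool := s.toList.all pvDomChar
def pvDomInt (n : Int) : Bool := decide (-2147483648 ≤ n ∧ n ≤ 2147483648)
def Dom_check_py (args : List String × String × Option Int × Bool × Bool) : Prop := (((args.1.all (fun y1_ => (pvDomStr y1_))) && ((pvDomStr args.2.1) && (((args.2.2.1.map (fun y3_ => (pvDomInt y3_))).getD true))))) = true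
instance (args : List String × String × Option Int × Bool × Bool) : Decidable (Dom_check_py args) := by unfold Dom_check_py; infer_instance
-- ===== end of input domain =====

-- B fuses A's three per-name passes (greedy match, long-run detection, set-membership formatting)
-- into one scan over the name's characters; same return value (objective: alternative).

-- ===== PORT A =====
-- match_positions: greedy subsequence scan over the lowered name
def matchPositions (name seq : List Char) : Option (List Int) :=
  let nl := PySem.Chars.lower name
  let r := (PySem.List.enumerate nl).foldl
    (fun (st : List Int × Nat) p =>
      if st.2 < seq.length && (p.2 == seq.getD st.2 ' ') then
        (st.1 ++ [p.1], st.2 + 1)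
      else st) ([], 0)
  if r.2 = seq.length then some r.1 else none

-- has_long_run with the default limit=2 (_check always calls it with the default)
def hasLongRun (positions : List Int) : Bool :=
  ((PySem.List.pyRange 1 (positions.length : Int)).foldl
    (fun (st : Nat × Bool) i =>
      if st.2 then st
      else if PySem.List.pyGetD positions i 0 == PySem.List.pyGetD positions (i - 1) 0 + 1 then
        (st.1 + 1, decide (st.1 + 1 > 2))
      else (1, false)) (1, false)).2

-- fmt's inner `while i < len(name) and i in matched` loop; fuel makes the while total
def fmtInner (name : List Char) (matched : PySem.Set Int) : Nat → Nat → List Char × Nat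
  | 0, i => ([], i)
  | fuel + 1, i =>
    if i < name.length && matched.contains (i : Int) then
      let r := fmtInner name matched fuel (i + 1)
      (PySem.Chars.upperChar (name.getD i ' ') :: r.1, r.2)
    else ([], i)

-- fmt's outer `while i < len(name)` loop (fuel = name.length suffices: i strictly increases)
def fmtOuter (name : List Char) (matched : PySem.Set Int) : Nat → Nat → List Char
  | 0, _ => []
  | fuel + 1, i =>
    if i < name.length then
      if matched.contains (i : Int) then
        let r := fmtInner name matched name.length i
        (['*', '*'] ++ r.1 ++ ['*', '*']) ++ fmtOuter name matched fuel r.2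
      else
        PySem.Chars.lowerChar (name.getD i ' ') :: fmtOuter name matched fuel (i + 1)
    else []

def fmtA (name : List Char) (positions : List Int) : List Char :=
  fmtOuter name (PySem.Set.ofList positions) name.length 0

def check_py (args : List String × String × Option Int × Bool × Bool) : List String :=
  let names := args.1
  let seq := args.2.1.toList
  let words := args.2.2.1
  let no_direct := args.2.2.2.1
  let do_fmt := args.2.2.2.2
  names.foldl (fun out n =>
    if (match words with
        | some w => ((PySem.Str.split₀ n).length : Int) != w
        | none => false) then out
    else
      match matchPositions n.toList seq with
      | none => out
      | some positions =>
        if no_direct && hasLongRun positions then out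
        else out ++ [if do_fmt then String.ofList (fmtA n.toList positions) else n]) []

-- ===== PORT B =====
-- one fused scan: subsequence matching + run tracking + formatted output in a single fold
def stepB (seq : List Char) (do_fmt : Bool)
    (st : Nat × Nat × Bool × Bool × List Char) (c : Char) : Nat × Nat × Bool × Bool × List Char :=
  let cl := PySem.Chars.lowerChar c
  if st.1 < seq.length && (cl == seq.getD st.1 ' ') then
    (st.1 + 1, st.2.1 + 1, st.2.2.1 || decide (st.2.1 + 1 > 2), true,
      st.2.2.2.2 ++ (if do_fmt then (if !st.2.2.2.1 then ['*', '*'] else []) ++ [PySem.Chars.upperChar c] else []))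
  else
    (st.1, 0, st.2.2.1, false,
      st.2.2.2.2 ++ (if do_fmt then (if st.2.2.2.1 then ['*', '*'] else []) ++ [cl] else []))

def check_py_alt (args : List String × String × Option Int × Bool × Bool) : List String :=
  let names := args.1
  let seq := args.2.1.toList
  let words := args.2.2.1
  let no_direct := args.2.2.2.1
  let do_fmt := args.2.2.2.2
  let k := seq.length
  names.foldl (fun result n =>
    if (match words with
        | some w => ((PySem.Str.split₀ n).length : Int) != w
        | none => false) then result
    else
      let st := n.toList.foldl (stepB seq do_fmt) (0, 0, false, false, [])
      if st.1 ≠ k then result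
      else if no_direct && st.2.2.1 then result
      else if do_fmt then
        result ++ [String.ofList (st.2.2.2.2 ++ (if st.2.2.2.1 then ['*', '*'] else []))]
      else result ++ [n]) []

-- ===== PRECONDITION & SPEC =====
def Spec_check_py (args : List String × String × Option Int × Bool × Bool) (out : List String) : Prop := out = check_py_alt args
instance (args : List String × String × Option Int × Bool × Bool) (out : List String) : Decidable (Spec_check_py args out) := by unfold Spec_check_py; infer_instance

-- ===== CLAIM (what is proved, stated in full; the proofs are below) =====
def Claim_equal_check_py : Prop := ∀ (args : List String × String × Option Int × Bool × Bool), Dom_check_py args → Spec_check_py args (check_py args)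

-- ===== LEMMAS AND PROOFS =====\n\n-- the per-character match decision both programs make at scan state si
def dec (seq : List Char) (si : Nat) (c : Char) : Bool :=
  si < seq.length && (PySem.Chars.lowerChar c == seq.getD si ' ')

-- reference: positions the greedy scan collects from the remaining chars (index i, state si)
def scanPos (seq : List Char) : List Char → Int → Nat → List Int
  | [], _, _ => []
  | c :: rest, i, si =>
    if dec seq si c then i :: scanPos seq rest (i + 1) (si + 1)
    else scanPos seq rest (i + 1) si

-- reference: final scan state
def sCount (seq : List Char) : List Char → Nat → Nat
  | [], si => si
  | c :: rest, si => if dec seq si c then sCount seq rest (si + 1) else sCount seq rest si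

-- reference: the formatted character stream emitted from scan state si (prev = previous char matched)
def wref (seq : List Char) : List Char → Nat → Bool → List Char
  | [], _, prev => if prev then ['*', '*'] else []
  | c :: rest, si, prev =>
    if dec seq si c then
      (if !prev then ['*', '*'] else []) ++ PySem.Chars.upperChar c :: wref seq rest (si + 1) true
    else
      (if prev then ['*', '*'] else []) ++ PySem.Chars.lowerChar c :: wref seq rest si false

-- reference: long-run flag (run = current consecutive-match count)
def lrref (seq : List Char) : List Char → Nat → Nat → Bool
  | [], _, _ => false
  | c :: rest, si, run =>
    if dec seq si c then decide (run + 1 > 2) || lrref seq rest (si + 1) (run + 1)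
    else lrref seq rest si 0

-- structural version of has_long_run (p = previous position, run = current run length)
def lrA : List Int → Int → Nat → Bool
  | [], _, _ => false
  | q :: rest, p, run =>
    if q = p + 1 then decide (run + 1 > 2) || lrA rest q (run + 1)
    else lrA rest q 1

-- decomposition invariant for the fmt proof
def decomp (seq name : List Char) (P : List Int) (i : Nat) (si : Nat) : Prop :=
  ∃ pf : List Int, (∀ x ∈ pf, x < (i : Int)) ∧ P = pf ++ scanPos seq (name.drop i) (i : Int) si

theorem scanPos_ge (seq : List Char) (l : List Char) (i : Int) (si : Nat) :
    ∀ x ∈ scanPos seq l i si, i ≤ x := by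
  induction l generalizing i si with
  | nil => simp [scanPos]
  | cons c rest ih =>
    intro x hx
    simp only [scanPos] at hx
    split at hx
    · rcases List.mem_cons.1 hx with h | h
      · omega
      · have := ih (i+1) (si+1) x h; omega
    · have := ih (i+1) si x hx; omega

theorem foldA_eq (seq : List Char) (l : List Char) (i : Int) (si : Nat) (acc : List Int) :
    (PySem.List.enumerate (PySem.Chars.lower l) i).foldl
      (fun (st : List Int × Nat) p =>
        if st.2 < seq.length && (p.2 == seq.getD st.2 ' ') then
          (st.1 ++ [p.1], st.2 + 1)
        else st) (acc, si)
      = (acc ++ scanPos seq l i si, sCount seq l si) := by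
  induction l generalizing i si acc with
  | nil => simp [scanPos, sCount, PySem.Chars.lower]
  | cons c rest ih =>
    simp only [PySem.Chars.lower, List.map_cons, PySem.List.enumerate_cons, List.foldl_cons]
    cases hdec : dec seq si c with
    | true =>
      have hb : (decide (si < seq.length) && (PySem.Chars.lowerChar c == seq.getD si ' ')) = true := hdec
      simp only [hb, if_true, Bool.true_eq_false]
      rw [show PySem.Chars.lower rest = List.map PySem.Chars.lowerChar rest from rfl] at ih
      rw [ih]
      simp [scanPos, sCount, hdec]
    | false =>
      have hb : (decide (si < seq.length) && (PySem.Chars.lowerChar c == seq.getD si ' ')) = false := hdec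
      simp only [hb, Bool.false_eq_true, if_false]
      rw [show PySem.Chars.lower rest = List.map PySem.Chars.lowerChar rest from rfl] at ih
      rw [ih]
      simp [scanPos, sCount, hdec]

theorem hasLongRun_found (positions : List Int) (l : List Int) (run : Nat) :
    (l.foldl (fun (st : Nat × Bool) i =>
      if st.2 then st
      else if PySem.List.pyGetD positions i 0 == PySem.List.pyGetD positions (i - 1) 0 + 1 then
        (st.1 + 1, decide (st.1 + 1 > 2))
      else (1, false)) (run, true)).2 = true := by
  induction l generalizing run with
  | nil => simp
  | cons x l ih => simpa using ih run

theorem getD_append_len {α : Type} (pre l : List α) (n : Nat) (d : α) :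
    (pre ++ l).getD (pre.length + n) d = l.getD n d := by
  simp [List.getD, List.getElem?_append_right (by omega : pre.length ≤ pre.length + n)]

theorem hasLongRun_fold (pre : List Int) (p : Int) (rest : List Int) (run : Nat) :
    ((PySem.List.pyRange ((pre.length + 1 : Nat) : Int) (((pre ++ p :: rest).length : Nat) : Int)).foldl
      (fun (st : Nat × Bool) i =>
        if st.2 then st
        else if PySem.List.pyGetD (pre ++ p :: rest) i 0 == PySem.List.pyGetD (pre ++ p :: rest) (i - 1) 0 + 1 then
          (st.1 + 1, decide (st.1 + 1 > 2))
        else (1, false)) (run, false)).2 = lrA rest p run := by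
  induction rest generalizing pre p run with
  | nil =>
    have h0 : PySem.List.pyRange ((pre.length + 1 : Nat) : Int) (((pre ++ [p]).length : Nat) : Int) = [] := by
      have h1 : ((pre ++ [p]).length : Int) = ((pre.length + 1 : Nat) : Int) := by simp
      rw [h1]
      simp [PySem.List.pyRange]
    rw [h0]; simp [lrA]
  | cons q rest ih =>
    have hcons : PySem.List.pyRange ((pre.length + 1 : Nat) : Int) (((pre ++ p :: q :: rest).length : Nat) : Int)
        = ((pre.length + 1 : Nat) : Int) :: PySem.List.pyRange (((pre.length + 1 : Nat) : Int) + 1) (((pre ++ p :: q :: rest).length : Nat) : Int) := by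
      apply PySem.List.pyRange_one_cons
      simp
    rw [hcons]
    simp only [List.foldl_cons]
    have hq : PySem.List.pyGetD (pre ++ p :: q :: rest) ((pre.length + 1 : Nat) : Int) 0 = q := by
      rw [PySem.List.pyGetD_natCast]
      have h2 := getD_append_len pre (p :: q :: rest) 1 0
      simpa using h2
    have hp : PySem.List.pyGetD (pre ++ p :: q :: rest) (((pre.length + 1 : Nat) : Int) - 1) 0 = p := by
      have h3 : (((pre.length + 1 : Nat) : Int) - 1) = ((pre.length : Nat) : Int) := by push_cast; ring
      rw [h3, PySem.List.pyGetD_natCast]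
      have h4 := getD_append_len pre (p :: q :: rest) 0 0
      simpa using h4
    simp only [hq, hp, Bool.false_eq_true, if_false]
    have hih := ih (pre ++ [p]) q
    have hidx : (((pre ++ [p]).length + 1 : Nat) : Int) = ((pre.length + 1 : Nat) : Int) + 1 := by
      simp
    have hlist : (pre ++ [p]) ++ q :: rest = pre ++ p :: q :: rest := by simp
    rw [hidx, hlist] at hih
    by_cases h : q = p + 1
    · have hb : (q == p + 1) = true := by simp [h]
      simp only [hb, if_true]
      rw [lrA, if_pos h]
      by_cases hr : run + 1 > 2
      · simp only [decide_eq_true hr, Bool.true_or]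
        exact hasLongRun_found _ _ _
      · have hd : decide (run + 1 > 2) = false := by simp [hr]
        rw [hd]
        simp only [Bool.false_or]
        exact hih (run + 1)
    · have hb : (q == p + 1) = false := by simp [h]
      simp only [hb, Bool.false_eq_true, if_false]
      rw [lrA, if_neg h]
      exact hih 1

theorem hasLongRun_eq (positions : List Int) :
    hasLongRun positions = match positions with
      | [] => false
      | p :: rest => lrA rest p 1 := by
  cases positions with
  | nil => simp [hasLongRun, PySem.List.pyRange]
  | cons p rest =>
    have h := hasLongRun_fold [] p rest 1
    simpa [hasLongRun] using h

theorem lrA_scanPos (seq : List Char) (l : List Char) (i : Int) (si : Nat) (p : Int) (run : Nat)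
    (hp : p < i) :
    lrA (scanPos seq l i si) p run = lrref seq l si (if p = i - 1 then run else 0) := by
  induction l generalizing i si p run with
  | nil => simp [scanPos, lrref, lrA]
  | cons c rest ih =>
    by_cases hdec : dec seq si c
    · simp only [scanPos, hdec, if_true, lrA, lrref]
      by_cases hpi : p = i - 1
      · have h1 : i = p + 1 := by omega
        rw [if_pos h1, if_pos hpi]
        have h2 := ih (i + 1) (si + 1) i (run + 1) (by omega)
        rw [if_pos (by omega : i = i + 1 - 1)] at h2
        rw [h2]
      · have h1 : ¬ i = p + 1 := by omega
        rw [if_neg h1, if_neg hpi]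
        have h2 := ih (i + 1) (si + 1) i 1 (by omega)
        rw [if_pos (by omega : i = i + 1 - 1)] at h2
        rw [h2]
        simp
    · simp only [scanPos, hdec, Bool.false_eq_true, if_false, lrref]
      have h2 := ih (i + 1) si p run (by omega)
      rw [if_neg (by omega : ¬ p = i + 1 - 1)] at h2
      rw [h2]

theorem lrATop_scanPos (seq : List Char) (l : List Char) (i : Int) (si : Nat) :
    (match scanPos seq l i si with
      | [] => false
      | p :: rest => lrA rest p 1) = lrref seq l si 0 := by
  induction l generalizing i si with
  | nil => simp [scanPos, lrref]
  | cons c rest ih =>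
    by_cases hdec : dec seq si c
    · simp only [scanPos, hdec, if_true, lrref]
      have h2 := lrA_scanPos seq rest (i + 1) (si + 1) i 1 (by omega)
      rw [if_pos (by omega : i = i + 1 - 1)] at h2
      rw [h2]
      simp
    · simp only [scanPos, hdec, Bool.false_eq_true, if_false, lrref]
      exact ih (i + 1) si

theorem drop_cons_of_lt (name : List Char) (i : Nat) (h : i < name.length) :
    name.drop i = name[i] :: name.drop (i + 1) :=
  (List.getElem_cons_drop h).symm

theorem scanPos_drop_cons (seq name : List Char) (i si : Nat) (h : i < name.length) :
    scanPos seq (name.drop i) (i : Int) si =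
      if dec seq si name[i] then
        ((i : Int)) :: scanPos seq (name.drop (i + 1)) ((i : Int) + 1) (si + 1)
      else scanPos seq (name.drop (i + 1)) ((i : Int) + 1) si := by
  rw [drop_cons_of_lt name i h]
  rfl

theorem contains_decomp (seq name : List Char) (P : List Int) (i si : Nat)
    (hd : decomp seq name P i si) (hi : i < name.length) :
    (PySem.Set.ofList P).contains (i : Int) = dec seq si name[i] := by
  obtain ⟨pf, hpf, hP⟩ := hd
  have hmem : (PySem.Set.ofList P).contains (i : Int) = decide ((i : Int) ∈ P) := by
    simp [PySem.Set.contains, PySem.Set.mem_ofList]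
  rw [hmem, hP, scanPos_drop_cons seq name i si hi]
  by_cases hdec : dec seq si name[i]
  · simp [hdec]
  · simp only [hdec, Bool.false_eq_true, if_false]
    have h1 : (i : Int) ∉ pf := fun h => absurd (hpf _ h) (by omega)
    have h2 : (i : Int) ∉ scanPos seq (name.drop (i + 1)) ((i : Int) + 1) si := by
      intro h
      have := scanPos_ge seq (name.drop (i + 1)) ((i : Int) + 1) si _ h
      omega
    simp [hdec, List.mem_append, h1, h2]

theorem fmtInner_spec (seq name : List Char) (P : List Int) :
    ∀ (fuel i si : Nat), name.length - i ≤ fuel → i ≤ name.length → decomp seq name P i si →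
    ∃ si',
      i ≤ (fmtInner name (PySem.Set.ofList P) fuel i).2 ∧
      (fmtInner name (PySem.Set.ofList P) fuel i).2 ≤ name.length ∧
      decomp seq name P (fmtInner name (PySem.Set.ofList P) fuel i).2 si' ∧
      wref seq (name.drop i) si true
        = (fmtInner name (PySem.Set.ofList P) fuel i).1 ++ ['*', '*']
          ++ wref seq (name.drop (fmtInner name (PySem.Set.ofList P) fuel i).2) si' false ∧
      (i < name.length → (PySem.Set.ofList P).contains (i : Int) = true → 0 < fuel →
        i < (fmtInner name (PySem.Set.ofList P) fuel i).2) := by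
  intro fuel
  induction fuel with
  | zero =>
    intro i si hfuel hle hd
    have hi : i = name.length := by omega
    refine ⟨si, le_refl _, by simp [fmtInner, hi], by simpa [fmtInner] using hd, ?_, fun _ _ h0 => absurd h0 (by omega)⟩
    simp only [fmtInner]
    rw [hi]
    simp [wref, List.drop_length]
  | succ fuel ih =>
    intro i si hfuel hle hd
    by_cases hi : i < name.length
    · have hc := contains_decomp seq name P i si hd hi
      by_cases hdec : dec seq si name[i]
      · have hcond : (decide (i < name.length) && (PySem.Set.ofList P).contains (i : Int)) = true := by
          rw [hc]; simp [hi, hdec]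
        have hd' : decomp seq name P (i + 1) (si + 1) := by
          obtain ⟨pf, hpf, hP⟩ := hd
          refine ⟨pf ++ [(i : Int)], ?_, ?_⟩
          · intro x hx
            rcases List.mem_append.1 hx with h | h
            · have := hpf x h; push_cast; omega
            · simp at h; subst h; push_cast; omega
          · rw [hP, scanPos_drop_cons seq name i si hi, if_pos hdec]
            push_cast
            simp
        obtain ⟨si', h1, h2, h3, h4, h5⟩ := ih (i + 1) (si + 1) (by omega) (by omega) hd'
        have hunf : fmtInner name (PySem.Set.ofList P) (fuel + 1) i
            = (PySem.Chars.upperChar (name.getD i ' ') :: (fmtInner name (PySem.Set.ofList P) fuel (i + 1)).1,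
               (fmtInner name (PySem.Set.ofList P) fuel (i + 1)).2) := by
          simp only [fmtInner, hcond, if_true]
        rw [hunf]
        refine ⟨si', by omega, h2, h3, ?_, fun _ _ _ => by omega⟩
        rw [drop_cons_of_lt name i hi, wref, if_pos hdec]
        simp only [Bool.not_true, Bool.false_eq_true, if_false, List.nil_append]
        rw [h4]
        have : name.getD i ' ' = name[i] := List.getD_eq_getElem name ' ' hi
        rw [this]
        simp
      · have hcond : (decide (i < name.length) && (PySem.Set.ofList P).contains (i : Int)) = false := by
          rw [hc]; simp [hdec]
        have hunf : fmtInner name (PySem.Set.ofList P) (fuel + 1) i = ([], i) := by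
          simp only [fmtInner, hcond, Bool.false_eq_true, if_false]
        rw [hunf]
        refine ⟨si, le_refl _, by omega, hd, ?_, ?_⟩
        · rw [drop_cons_of_lt name i hi]
          rw [show (wref seq (name[i] :: name.drop (i+1)) si true)
              = (if true then ['*','*'] else []) ++ PySem.Chars.lowerChar name[i] :: wref seq (name.drop (i+1)) si false from by
            rw [wref, if_neg (by simpa using hdec)]]
          rw [show (wref seq (name[i] :: name.drop (i+1)) si false)
              = PySem.Chars.lowerChar name[i] :: wref seq (name.drop (i+1)) si false from by
            rw [wref, if_neg (by simpa using hdec)]; simp]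
          simp
        · intro _ hcont _
          rw [hc] at hcont
          exact absurd hcont (by simp [hdec])
    · have hieq : i = name.length := by omega
      have hunf : fmtInner name (PySem.Set.ofList P) (fuel + 1) i = ([], i) := by
        simp only [fmtInner]
        rw [if_neg]
        simp [hieq]
      rw [hunf]
      refine ⟨si, le_refl _, by omega, hd, ?_, by omega⟩
      rw [hieq]
      simp [wref, List.drop_length]

theorem fmtOuter_spec (seq name : List Char) (P : List Int) :
    ∀ (fuel i si : Nat), name.length - i ≤ fuel → decomp seq name P i si →
    fmtOuter name (PySem.Set.ofList P) fuel i = wref seq (name.drop i) si false := by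
  intro fuel
  induction fuel with
  | zero =>
    intro i si hfuel hd
    have : name.drop i = [] := List.drop_eq_nil_of_le (by omega)
    simp [fmtOuter, this, wref]
  | succ fuel ih =>
    intro i si hfuel hd
    by_cases hi : i < name.length
    · have hc := contains_decomp seq name P i si hd hi
      by_cases hdec : dec seq si name[i]
      · have hcont : (PySem.Set.ofList P).contains (i : Int) = true := by rw [hc]; exact hdec
        obtain ⟨si', h1, h2, h3, h4, h5⟩ :=
          fmtInner_spec seq name P name.length i si (by omega) (by omega) hd
        have hlt : i < (fmtInner name (PySem.Set.ofList P) name.length i).2 :=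
          h5 hi hcont (by omega)
        have hunf : fmtOuter name (PySem.Set.ofList P) (fuel + 1) i
            = (['*', '*'] ++ (fmtInner name (PySem.Set.ofList P) name.length i).1 ++ ['*', '*'])
              ++ fmtOuter name (PySem.Set.ofList P) fuel (fmtInner name (PySem.Set.ofList P) name.length i).2 := by
          simp only [fmtOuter, hi, if_true, hcont]
        rw [hunf, ih _ si' (by omega) h3]
        rw [drop_cons_of_lt name i hi]
        rw [show (wref seq (name[i] :: name.drop (i+1)) si false)
            = ['*','*'] ++ PySem.Chars.upperChar name[i] :: wref seq (name.drop (i+1)) (si+1) true from by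
          rw [wref, if_pos hdec]; simp]
        have h4' := h4
        rw [drop_cons_of_lt name i hi] at h4'
        rw [show (wref seq (name[i] :: name.drop (i+1)) si true)
            = PySem.Chars.upperChar name[i] :: wref seq (name.drop (i+1)) (si+1) true from by
          rw [wref, if_pos hdec]; simp] at h4'
        simp only [List.append_assoc] at h4' ⊢
        rw [← h4']
      · have hcont : (PySem.Set.ofList P).contains (i : Int) = false := by
          rw [hc]; simpa using hdec
        have hd' : decomp seq name P (i + 1) si := by
          obtain ⟨pf, hpf, hP⟩ := hd
          refine ⟨pf, fun x hx => by have := hpf x hx; push_cast; omega, ?_⟩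
          rw [hP, scanPos_drop_cons seq name i si hi, if_neg (by simpa using hdec)]
          push_cast
          rfl
        have hunf : fmtOuter name (PySem.Set.ofList P) (fuel + 1) i
            = PySem.Chars.lowerChar (name.getD i ' ') :: fmtOuter name (PySem.Set.ofList P) fuel (i + 1) := by
          simp only [fmtOuter, hi, if_true, hcont, Bool.false_eq_true, if_false]
        rw [hunf, ih (i + 1) si (by omega) hd']
        rw [drop_cons_of_lt name i hi]
        rw [show (wref seq (name[i] :: name.drop (i+1)) si false)
            = PySem.Chars.lowerChar name[i] :: wref seq (name.drop (i+1)) si false from by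
          rw [wref, if_neg (by simpa using hdec)]; simp]
        rw [List.getD_eq_getElem name ' ' hi]
    · have : name.drop i = [] := List.drop_eq_nil_of_le (by omega)
      simp [fmtOuter, hi, this, wref]

theorem fmtA_eq (seq name : List Char) :
    fmtA name (scanPos seq name 0 0) = wref seq name 0 false := by
  have hd : decomp seq name (scanPos seq name 0 0) 0 0 := ⟨[], by simp, by simp⟩
  have := fmtOuter_spec seq name (scanPos seq name 0 0) name.length 0 0 (by omega) hd
  simpa [fmtA] using this

theorem foldB_eq (seq : List Char) (do_fmt : Bool) (l : List Char) :
    ∀ (si run : Nat) (lrAcc prev : Bool) (pieces : List Char),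
    (l.foldl (stepB seq do_fmt) (si, run, lrAcc, prev, pieces)).1 = sCount seq l si ∧
    (l.foldl (stepB seq do_fmt) (si, run, lrAcc, prev, pieces)).2.2.1 = (lrAcc || lrref seq l si run) ∧
    (do_fmt = true →
      (l.foldl (stepB seq do_fmt) (si, run, lrAcc, prev, pieces)).2.2.2.2
        ++ (if (l.foldl (stepB seq do_fmt) (si, run, lrAcc, prev, pieces)).2.2.2.1 then ['*', '*'] else [])
      = pieces ++ wref seq l si prev) := by
  induction l with
  | nil => intro si run lrAcc prev pieces
           refine ⟨rfl, by simp [sCount, lrref], ?_⟩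
           intro h; simp [wref]
  | cons c rest ih =>
    intro si run lrAcc prev pieces
    simp only [List.foldl_cons]
    by_cases hdec : dec seq si c
    · have hb : (decide (si < seq.length) && (PySem.Chars.lowerChar c == seq.getD si ' ')) = true := hdec
      have hstep : stepB seq do_fmt (si, run, lrAcc, prev, pieces) c
          = (si + 1, run + 1, lrAcc || decide (run + 1 > 2), true,
             pieces ++ (if do_fmt then (if !prev then ['*', '*'] else []) ++ [PySem.Chars.upperChar c] else [])) := by
        simp only [stepB, hb, if_true]
      simp only [hstep]
      obtain ⟨h1, h2, h3⟩ := ih (si + 1) (run + 1) (lrAcc || decide (run + 1 > 2)) true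
          (pieces ++ (if do_fmt then (if !prev then ['*', '*'] else []) ++ [PySem.Chars.upperChar c] else []))
      refine ⟨by rw [h1]; simp [sCount, hdec], ?_, ?_⟩
      · rw [h2]; simp [lrref, hdec, Bool.or_assoc]
      · intro hf
        rw [h3 hf]
        simp [wref, hdec, hf]
    · have hb : (decide (si < seq.length) && (PySem.Chars.lowerChar c == seq.getD si ' ')) = false := by
        have : dec seq si c = false := by simpa using hdec
        exact this
      have hstep : stepB seq do_fmt (si, run, lrAcc, prev, pieces) c
          = (si, 0, lrAcc, false,
             pieces ++ (if do_fmt then (if prev then ['*', '*'] else []) ++ [PySem.Chars.lowerChar c] else [])) := by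
        simp only [stepB, hb, Bool.false_eq_true, if_false]
      simp only [hstep]
      obtain ⟨h1, h2, h3⟩ := ih si 0 lrAcc false
          (pieces ++ (if do_fmt then (if prev then ['*', '*'] else []) ++ [PySem.Chars.lowerChar c] else []))
      refine ⟨by rw [h1]; simp [sCount, hdec], ?_, ?_⟩
      · rw [h2]; simp [lrref, hdec]
      · intro hf
        rw [h3 hf]
        simp [wref, hdec, hf]

theorem matchPositions_eq (seq name : List Char) :
    matchPositions name seq =
      if sCount seq name 0 = seq.length then some (scanPos seq name 0 0) else none := by
  simp only [matchPositions]
  rw [foldA_eq seq name 0 0 []]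
  simp

theorem step_eq (seq : List Char) (words : Option Int) (no_direct do_fmt : Bool)
    (out : List String) (n : String) :
    (if (match words with
        | some w => ((PySem.Str.split₀ n).length : Int) != w
        | none => false) then out
    else
      match matchPositions n.toList seq with
      | none => out
      | some positions =>
        if no_direct && hasLongRun positions then out
        else out ++ [if do_fmt then String.ofList (fmtA n.toList positions) else n])
    = (if (match words with
        | some w => ((PySem.Str.split₀ n).length : Int) != w
        | none => false) then out
    else
      let st := n.toList.foldl (stepB seq do_fmt) (0, 0, false, false, [])
      if st.1 ≠ seq.length then out
      else if no_direct && st.2.2.1 then out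
      else if do_fmt then
        out ++ [String.ofList (st.2.2.2.2 ++ (if st.2.2.2.1 then ['*', '*'] else []))]
      else out ++ [n]) := by
  cases hw : (match words with
      | some w => ((PySem.Str.split₀ n).length : Int) != w
      | none => false) with
  | true => simp
  | false =>
    simp only [Bool.false_eq_true, if_false]
    obtain ⟨h1, h2, h3⟩ := foldB_eq seq do_fmt n.toList 0 0 false false []
    rw [matchPositions_eq]
    by_cases hk : sCount seq n.toList 0 = seq.length
    · rw [if_pos hk]
      have hne : ¬ (n.toList.foldl (stepB seq do_fmt) (0, 0, false, false, [])).1 ≠ seq.length := by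
        rw [h1]; omega
      simp only [hne, if_false]
      have hlr : hasLongRun (scanPos seq n.toList 0 0)
          = (n.toList.foldl (stepB seq do_fmt) (0, 0, false, false, [])).2.2.1 := by
        rw [h2, hasLongRun_eq, Bool.false_or]
        exact lrATop_scanPos seq n.toList 0 0
      rw [hlr]
      split
      · rfl
      · by_cases hfmt : do_fmt = true
        · have hp := h3 hfmt
          simp only [List.nil_append] at hp
          rw [hfmt]
          rw [hfmt] at hp
          simp only [if_true]
          rw [fmtA_eq, ← hp]
        · have hff : do_fmt = false := by
            cases do_fmt
            · rfl
            · exact absurd rfl hfmt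
          rw [hff] at h3 ⊢
          simp
    · rw [if_neg hk]
      have hne : (n.toList.foldl (stepB seq do_fmt) (0, 0, false, false, [])).1 ≠ seq.length := by
        rw [h1]; exact hk
      rw [if_pos hne]

-- ===== VERDICT (by name: the statement is the Claim_ definition above) =====
theorem check_py_spec : Claim_equal_check_py := by
  intro args hdom
  unfold Spec_check_py
  obtain ⟨names, s, words, no_direct, do_fmt⟩ := args
  clear hdom
  show check_py (names, s, words, no_direct, do_fmt) = check_py_alt (names, s, words, no_direct, do_fmt)
  unfold check_py check_py_alt
  simp only []
  induction names using List.reverseRecOn with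
  | nil => rfl
  | append_singleton xs x ih =>
    rw [List.foldl_append, List.foldl_append, ← ih]
    exact step_eq s.toList words no_direct do_fmt _ x
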